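-- pv_equiv track=rewrite | github.com/WardMaes/aoc-2020 | day_06/day_06.py | group_answers
-- ===== SOURCE A (Python) =====
-- def group_answers(group):
--   values = {}
--   persons = group.split('\n')
--
--   for person in persons:
--     for answer in person:
--       if answer in values:
--         values[answer] += 1
--       else:
--         values[answer] = 1
--   return values
-- ===== SOURCE B (Python) =====
-- def group_answers(group):
--   s = group.replace('\n', '')
--   return {c: s.count(c) for c in dict.fromkeys(s)}
-- ===== Notes on version B (the rewrite author's own statement) =====
-- stated objective: faster
-- what changed: Replaces the split-lines + per-character accumulating dict pass with newline removal, an ordered distinct-letter pass (dict.fromkeys), and one str.count scan per distinct letter.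
import Mathlib
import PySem

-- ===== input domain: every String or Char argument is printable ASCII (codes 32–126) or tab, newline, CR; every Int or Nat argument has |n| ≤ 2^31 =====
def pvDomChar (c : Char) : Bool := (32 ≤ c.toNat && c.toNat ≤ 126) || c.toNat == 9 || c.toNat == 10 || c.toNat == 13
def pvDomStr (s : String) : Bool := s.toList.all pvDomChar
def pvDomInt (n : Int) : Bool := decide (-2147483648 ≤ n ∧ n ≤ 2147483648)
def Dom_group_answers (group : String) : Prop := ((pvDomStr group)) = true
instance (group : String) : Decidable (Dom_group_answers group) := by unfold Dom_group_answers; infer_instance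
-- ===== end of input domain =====

-- B replaces A's split-lines + one accumulating dict pass by newline removal, ordered dedup of the letters, and one full-string count per distinct letter (alternative decomposition, same result).



-- ===== PORT A =====
def group_answers (group : String) : List (String × Int) :=
  let persons : List String := (PySem.Str.split? group "\n").getD []
  (persons.foldl
    (fun values person =>
      person.toList.foldl
        (fun values answer =>
          if values.contains (String.ofList [answer]) then
            values.insert (String.ofList [answer]) (values.getD (String.ofList [answer]) 0 + 1)
          else
            values.insert (String.ofList [answer]) 1)
        values)
    (PySem.Dict.empty : PySem.Dict String Int)).items

-- ===== PORT B =====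
def group_answers_alt (group : String) : List (String × Int) :=
  let s := PySem.Str.replace group "\n" ""
  (PySem.List.dedup s.toList).map
    (fun c => (String.ofList [c], (PySem.Str.count s (String.ofList [c]) : Int)))

-- ===== PRECONDITION & SPEC =====
def Spec_group_answers (group : String) (out : List (String × Int)) : Prop := out = group_answers_alt group
instance (group : String) (out : List (String × Int)) : Decidable (Spec_group_answers group out) := by unfold Spec_group_answers; infer_instance

-- ===== CLAIM (what is proved, stated in full; the proofs are below) =====
def Claim_equal_group_answers : Prop := ∀ (group : String), Dom_group_answers group → Spec_group_answers group (group_answers group)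

-- ===== LEMMAS AND PROOFS =====

theorem lem_go_replace (fuel : Nat) (l acc : List Char) (h : l.length ≤ fuel) :
    PySem.Chars.replace.go ['\n'] [] fuel l acc
      = acc.reverse ++ l.filter (fun c => !(c == '\n')) := by
  induction fuel generalizing l acc with
  | zero =>
    have : l = [] := List.eq_nil_of_length_eq_zero (Nat.le_zero.mp h)
    subst this; simp [PySem.Chars.replace.go]
  | succ n ih =>
    cases l with
    | nil => simp [PySem.Chars.replace.go]
    | cons c t =>
      by_cases hc : c = '\n'
      · subst hc
        have hp : List.isPrefixOf ['\n'] ('\n' :: t) = true := by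
          simp [List.isPrefixOf]
        simp only [PySem.Chars.replace.go, hp, if_true, List.length_cons, List.length_nil,
          List.drop_succ_cons, List.drop_zero, List.reverse_nil, List.nil_append]
        rw [ih t acc (by simpa using h)]
        simp
      · have hp : List.isPrefixOf ['\n'] (c :: t) = false := by
          simp [List.isPrefixOf]
          exact fun hh => hc hh.symm
        simp only [PySem.Chars.replace.go, hp, Bool.false_eq_true, if_false]
        rw [ih t (c :: acc) (by simpa using h)]
        simp [hc]

theorem lem_replace (group : String) :
    (PySem.Str.replace group "\n" "").toList
      = group.toList.filter (fun c => !(c == '\n')) := by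
  rw [PySem.Str.toList_replace]
  show PySem.Chars.replace group.toList ['\n'] [] = _
  rw [PySem.Chars.replace]
  simp only [List.isEmpty_cons, Bool.false_eq_true, if_false]
  rw [lem_go_replace group.toList.length group.toList [] (Nat.le_refl _)]
  simp

theorem lem_go_split (fuel : Nat) (l cur : List Char) (acc : List (List Char)) (h : l.length ≤ fuel) :
    (PySem.Chars.splitOn.go ['\n'] fuel l cur acc).flatten
      = acc.reverse.flatten ++ cur.reverse ++ l.filter (fun c => !(c == '\n')) := by
  induction fuel generalizing l cur acc with
  | zero =>
    have : l = [] := List.eq_nil_of_length_eq_zero (Nat.le_zero.mp h)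
    subst this; simp [PySem.Chars.splitOn.go]
  | succ n ih =>
    cases l with
    | nil => simp [PySem.Chars.splitOn.go]
    | cons c t =>
      by_cases hc : c = '\n'
      · subst hc
        have hp : List.isPrefixOf ['\n'] ('\n' :: t) = true := by
          simp [List.isPrefixOf]
        simp only [PySem.Chars.splitOn.go, hp, if_true, List.length_cons, List.length_nil,
          List.drop_succ_cons, List.drop_zero]
        rw [ih t [] (cur.reverse :: acc) (by simpa using h)]
        simp
      · have hp : List.isPrefixOf ['\n'] (c :: t) = false := by
          simp [List.isPrefixOf]
          exact fun hh => hc hh.symm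
        simp only [PySem.Chars.splitOn.go, hp, Bool.false_eq_true, if_false]
        rw [ih t (c :: cur) acc (by simpa using h)]
        simp [hc]

theorem lem_split_flatten (group : String) :
    (PySem.Chars.splitOn group.toList ['\n']).flatten
      = group.toList.filter (fun c => !(c == '\n')) := by
  rw [PySem.Chars.splitOn]
  rw [lem_go_split (group.toList.length + 1) group.toList [] [] (Nat.le_succ _)]
  simp

theorem lem_go_count (c0 : Char) (fuel : Nat) (l : List Char) (acc : Nat) (h : l.length ≤ fuel) :
    PySem.Chars.count.go [c0] fuel l acc = acc + l.count c0 := by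
  induction fuel generalizing l acc with
  | zero =>
    have : l = [] := List.eq_nil_of_length_eq_zero (Nat.le_zero.mp h)
    subst this; simp [PySem.Chars.count.go]
  | succ n ih =>
    cases l with
    | nil => simp [PySem.Chars.count.go]
    | cons c t =>
      by_cases hc : c = c0
      · subst hc
        have hp : List.isPrefixOf [c] (c :: t) = true := by simp [List.isPrefixOf]
        simp only [PySem.Chars.count.go, hp, if_true, List.length_cons, List.length_nil,
          List.drop_succ_cons, List.drop_zero]
        rw [ih t (acc + 1) (by simpa using h)]
        rw [List.count_cons_self]
        omega
      · have hp : List.isPrefixOf [c0] (c :: t) = false := by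
          simp [List.isPrefixOf]
          exact fun h => hc h.symm
        simp only [PySem.Chars.count.go, hp, Bool.false_eq_true, if_false]
        rw [ih t acc (by simpa using h)]
        rw [List.count_cons_of_ne hc]

theorem lem_count (s : String) (c : Char) :
    PySem.Str.count s (String.ofList [c]) = s.toList.count c := by
  rw [PySem.Str.count_eq, String.toList_ofList]
  show PySem.Chars.count s.toList [c] = _
  rw [PySem.Chars.count]
  simp only [List.isEmpty_cons, Bool.false_eq_true, if_false]
  simpa using lem_go_count c s.toList.length s.toList 0 (Nat.le_refl _)

theorem lem_step (d : PySem.Dict String Int) (k : String) :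
    (if d.contains k then d.insert k (d.getD k 0 + 1) else d.insert k 1)
      = d.insert k (d.getD k 0 + 1) := by
  by_cases h : d.contains k = true
  · simp [h]
  · have hfalse : d.items.any (fun p => p.fst == k) = false := by
      have hc : d.contains k = false := by simpa using h
      simpa [PySem.Dict.contains] using hc
    have hn : d.items.find? (fun p => p.fst == k) = none := by
      rw [List.find?_eq_none]
      intro p hp
      simpa using List.any_eq_false.mp hfalse p hp
    have h0 : d.getD k 0 = 0 := by
      simp [PySem.Dict.getD, PySem.Dict.get?, hn]
    rw [h0]
    simp [h]

theorem lem_singleton_inj (c d : Char) (h : String.ofList [c] = String.ofList [d]) : c = d := by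
  have := congrArg String.toList h
  simpa using this

theorem lem_foldl_add_map (l acc : List Char) :
    List.foldl PySem.Set.add (acc.map (fun c => String.ofList [c])) (l.map (fun c => String.ofList [c]))
      = (List.foldl PySem.Set.add acc l).map (fun c => String.ofList [c]) := by
  induction l generalizing acc with
  | nil => simp
  | cons x t ih =>
    simp only [List.map_cons, List.foldl_cons]
    have hcont : PySem.Set.contains (acc.map (fun c => String.ofList [c])) (String.ofList [x])
        = PySem.Set.contains acc x := by
      simp only [PySem.Set.contains, List.contains_eq_mem, decide_eq_decide, List.mem_map]
      constructor
      · rintro ⟨a, ha, he⟩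
        rwa [lem_singleton_inj a x he] at ha
      · intro hx; exact ⟨x, hx, rfl⟩
    have hadd : PySem.Set.add (acc.map (fun c => String.ofList [c])) (String.ofList [x])
        = (PySem.Set.add acc x).map (fun c => String.ofList [c]) := by
      simp only [PySem.Set.add, hcont]
      by_cases hm : x ∈ acc <;> simp [hm, PySem.Set.contains]
    rw [hadd, ih]

theorem lem_ofList_map (l : List Char) :
    PySem.Set.ofList (l.map (fun c => String.ofList [c]))
      = (PySem.Set.ofList l).map (fun c => String.ofList [c]) := by
  have := lem_foldl_add_map l []
  simpa [PySem.Set.ofList, PySem.Set.empty] using this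

theorem lem_count_map (l : List Char) (c : Char) :
    List.count (String.ofList [c]) (l.map (fun c => String.ofList [c])) = List.count c l := by
  simp only [List.count_eq_countP, List.countP_map]
  apply List.countP_congr
  intro a _
  by_cases h : a = c
  · subst h; simp
  · have hne : String.ofList [a] ≠ String.ofList [c] := fun hh => h (lem_singleton_inj a c hh)
    simp [Function.comp_apply, h, hne]

theorem lem_A (group : String) :
    group_answers group
      = (PySem.Dict.counter ((group.toList.filter (fun c => !(c == '\n'))).map
          (fun c => String.ofList [c]))).items := by
  simp only [group_answers]
  have hsplit : (PySem.Str.split? group "\n").getD []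
      = (PySem.Chars.splitOn group.toList ['\n']).map String.ofList := by
    simp [PySem.Str.split?, PySem.Chars.split?]
  rw [hsplit, List.foldl_map]
  simp only [String.toList_ofList]
  rw [← List.foldl_flatten, lem_split_flatten]
  have hstep : (fun (values : PySem.Dict String Int) (answer : Char) =>
        if values.contains (String.ofList [answer]) then
          values.insert (String.ofList [answer]) (values.getD (String.ofList [answer]) 0 + 1)
        else values.insert (String.ofList [answer]) 1)
      = fun values answer =>
          values.insert (String.ofList [answer]) (values.getD (String.ofList [answer]) 0 + 1) := by
    funext d a
    exact lem_step d (String.ofList [a])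
  rw [hstep]
  have hm : ∀ (l : List Char) (d : PySem.Dict String Int),
      List.foldl (fun values answer =>
          values.insert (String.ofList [answer]) (values.getD (String.ofList [answer]) 0 + 1)) d l
        = List.foldl (fun values k => values.insert k (values.getD k 0 + 1)) d
            (l.map (fun c => String.ofList [c])) := by
    intro l d
    rw [List.foldl_map]
  rw [hm, PySem.Dict.foldl_insert_getD_add_one_eq_counter]

theorem lem_B (group : String) :
    group_answers_alt group
      = (PySem.Set.ofList (group.toList.filter (fun c => !(c == '\n')))).map
          (fun c => (String.ofList [c],
            ((group.toList.filter (fun c => !(c == '\n'))).count c : Int))) := by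
  simp only [group_answers_alt]
  simp only [PySem.List.dedup, lem_replace]
  apply List.map_congr_left
  intro a _
  have : PySem.Str.count (PySem.Str.replace group "\n" "") (String.ofList [a])
      = (group.toList.filter (fun c => !(c == '\n'))).count a := by
    rw [lem_count, lem_replace]
  rw [this]

-- ===== VERDICT (by name: the statement is the Claim_ definition above) =====
theorem group_answers_spec : Claim_equal_group_answers := by
  intro group _
  show group_answers group = group_answers_alt group
  rw [lem_A, lem_B, PySem.Dict.items_counter, lem_ofList_map, List.map_map]
  apply List.map_congr_left
  intro a _
  simp only [Function.comp_apply]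
  rw [lem_count_map]
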